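-- pv_equiv track=rewrite | github.com/revantt/Docker_bot | web/temporaryUtils.py | getMappedShipmethodToTemplates
-- ===== SOURCE A (Python) =====
-- def getMappedShipmethodToTemplates(shipmethodTemplates, uniqueTemplates):
--     templateShipmethod = {}
--     for template in uniqueTemplates:
--         templateShipmethod[template] = set()
--         for shipmethod, shipmethodTemplate in shipmethodTemplates.items():
--             if "ZPL" in shipmethodTemplate and template in shipmethodTemplate["ZPL"] or \
--                     "PNG" in shipmethodTemplate and template in shipmethodTemplate["PNG"]:
--                 templateShipmethod[template].add(shipmethod)
--     return templateShipmethod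
-- ===== SOURCE B (Python) =====
-- def getMappedShipmethodToTemplates(shipmethodTemplates, uniqueTemplates):
--     # Inverted single pass: O(S*L + U) instead of A's O(U*S*L).
--     result = {template: set() for template in uniqueTemplates}
--     wanted = set(uniqueTemplates)
--     for shipmethod, shipmethodTemplate in shipmethodTemplates.items():
--         for template in shipmethodTemplate.get("ZPL", []) + shipmethodTemplate.get("PNG", []):
--             if template in wanted:
--                 result[template].add(shipmethod)
--     return result
-- ===== Notes on version B (the rewrite author's own statement) =====
-- stated objective: faster
-- what changed: Instead of rescanning every shipmethod's ZPL/PNG lists once per template, B builds the per-template sets in a single inverted pass over the shipmethods, dispatching each listed template through a set of the wanted templates.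
import Mathlib
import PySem

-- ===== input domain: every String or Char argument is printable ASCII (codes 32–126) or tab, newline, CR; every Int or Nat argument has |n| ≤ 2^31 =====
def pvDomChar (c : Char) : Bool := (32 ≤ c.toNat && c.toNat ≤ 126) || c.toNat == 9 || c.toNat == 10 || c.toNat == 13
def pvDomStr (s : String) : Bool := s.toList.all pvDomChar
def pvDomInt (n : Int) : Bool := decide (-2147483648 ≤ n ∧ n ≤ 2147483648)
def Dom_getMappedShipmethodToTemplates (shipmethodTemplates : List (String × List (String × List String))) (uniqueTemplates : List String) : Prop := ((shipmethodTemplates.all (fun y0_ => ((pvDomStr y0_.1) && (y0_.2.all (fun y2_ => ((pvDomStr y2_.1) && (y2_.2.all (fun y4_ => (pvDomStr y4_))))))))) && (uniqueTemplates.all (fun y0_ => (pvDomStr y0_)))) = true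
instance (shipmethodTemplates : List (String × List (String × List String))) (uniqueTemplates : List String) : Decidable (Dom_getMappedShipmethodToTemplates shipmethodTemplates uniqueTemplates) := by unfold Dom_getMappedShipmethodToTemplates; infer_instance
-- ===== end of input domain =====

-- ===== PORT A =====
-- B replaces A's per-template rescans of every shipmethod with one inverted pass over the shipmethods.
-- helper for A's condition: "ZPL" in d and t in d["ZPL"] or "PNG" in d and t in d["PNG"]
def pvHit (d : List (String × List String)) (t : String) : Bool :=
  (match PySem.Dict.get? (PySem.Dict.mk d) "ZPL" with
   | some zl => decide (t ∈ zl)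
   | none => false)
  ||
  (match PySem.Dict.get? (PySem.Dict.mk d) "PNG" with
   | some pl => decide (t ∈ pl)
   | none => false)

def getMappedShipmethodToTemplates (shipmethodTemplates : List (String × List (String × List String))) (uniqueTemplates : List String) : List (String × List String) :=
  (uniqueTemplates.foldl
    (fun acc t =>
      shipmethodTemplates.foldl
        (fun acc p =>
          if pvHit p.2 t then PySem.Dict.modify acc t [] (fun st => PySem.Set.add st p.1) else acc)
        (PySem.Dict.insert acc t ([] : List String)))
    (PySem.Dict.empty : PySem.Dict String (List String))).items

-- ===== PORT B =====
def getMappedShipmethodToTemplates_alt (shipmethodTemplates : List (String × List (String × List String))) (uniqueTemplates : List String) : List (String × List String) :=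
  let result : PySem.Dict String (List String) :=
    uniqueTemplates.foldl (fun acc t => PySem.Dict.insert acc t ([] : List String)) PySem.Dict.empty
  let wanted : PySem.Set String := PySem.Set.ofList uniqueTemplates
  (shipmethodTemplates.foldl
    (fun acc p =>
      (PySem.Dict.getD (PySem.Dict.mk p.2) "ZPL" [] ++ PySem.Dict.getD (PySem.Dict.mk p.2) "PNG" []).foldl
        (fun acc t => if t ∈ wanted then PySem.Dict.modify acc t [] (fun st => PySem.Set.add st p.1) else acc)
        acc)
    result).items

-- ===== PRECONDITION & SPEC =====
def Spec_getMappedShipmethodToTemplates (shipmethodTemplates : List (String × List (String × List String))) (uniqueTemplates : List String) (out : List (String × List String)) : Prop := out = getMappedShipmethodToTemplates_alt shipmethodTemplates uniqueTemplates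
instance (shipmethodTemplates : List (String × List (String × List String))) (uniqueTemplates : List String) (out : List (String × List String)) : Decidable (Spec_getMappedShipmethodToTemplates shipmethodTemplates uniqueTemplates out) := by unfold Spec_getMappedShipmethodToTemplates; infer_instance

-- ===== CLAIM (what is proved, stated in full; the proofs are below) =====
def Claim_equal_getMappedShipmethodToTemplates : Prop := ∀ (shipmethodTemplates : List (String × List (String × List String))) (uniqueTemplates : List String), Dom_getMappedShipmethodToTemplates shipmethodTemplates uniqueTemplates → Spec_getMappedShipmethodToTemplates shipmethodTemplates uniqueTemplates (getMappedShipmethodToTemplates shipmethodTemplates uniqueTemplates)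

-- ===== LEMMAS AND PROOFS =====

-- the value both dicts carry at key t: matching shipmethods, in order, deduplicated
def pvVal (smts : List (String × List (String × List String))) (t : String) : List String :=
  smts.foldl (fun st p => if pvHit p.2 t then PySem.Set.add st p.1 else st) []

theorem pv_insert_insert_same {κ ν : Type} [BEq κ] [LawfulBEq κ] (d : PySem.Dict κ ν) (k : κ) (v w : ν) :
    (d.insert k v).insert k w = d.insert k w := by
  obtain ⟨l⟩ := d
  by_cases hany : (l.any fun p => p.1 == k) = true
  · have h1 : PySem.Dict.insert ⟨l⟩ k v = ⟨l.map (fun p => if (p.1 == k) = true then (k, v) else p)⟩ := by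
      simp [PySem.Dict.insert, PySem.Dict.contains, hany]
    have h2 : ((l.map (fun p => if (p.1 == k) = true then (k, v) else p)).any fun p => p.1 == k) = true := by
      simp only [List.any_map, List.any_eq_true] at hany ⊢
      obtain ⟨p, hp, hk⟩ := hany
      exact ⟨p, hp, by simp [Function.comp, hk]⟩
    rw [h1]
    simp only [PySem.Dict.insert, PySem.Dict.contains, PySem.Dict.items, h2, hany, if_pos]
    congr 1
    rw [List.map_map]
    apply List.map_congr_left
    intro p _
    by_cases hk : (p.1 == k) = true <;> simp [Function.comp, hk]
  · have h1 : PySem.Dict.insert ⟨l⟩ k v = ⟨l ++ [(k, v)]⟩ := by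
      simp [PySem.Dict.insert, PySem.Dict.contains, hany]
    have h2 : ((l ++ [(k, v)]).any fun p => p.1 == k) = true := by simp
    rw [h1]
    simp only [PySem.Dict.insert, PySem.Dict.contains, PySem.Dict.items, h2, hany, if_pos, if_neg, Bool.not_eq_true]
    congr 1
    rw [List.map_append]
    simp only [List.any_eq_true, not_exists] at hany
    have : l.map (fun p => if (p.1 == k) = true then (k, w) else p) = l := by
      rw [show l = l.map id from (List.map_id l).symm]
      rw [List.map_map]
      apply List.map_congr_left
      intro p hp
      have hne : (p.1 == k) = false := Bool.eq_false_iff.mpr (fun h => hany p ⟨hp, h⟩)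
      simp [Function.comp, hne]
    simp [this]

theorem pv_insert_mapfun (S : List String) (f : String → List String) (t : String) :
    (PySem.Dict.mk (S.map (fun x => (x, f x)))).insert t (f t)
      = PySem.Dict.mk ((PySem.Set.add S t).map (fun x => (x, f x))) := by
  by_cases h : t ∈ S
  · have hc : ((S.map (fun x => (x, f x))).any fun p => p.1 == t) = true := by
      simp only [List.any_map, List.any_eq_true, Function.comp]
      exact ⟨t, h, by simp⟩
    have hadd : PySem.Set.add S t = S := PySem.Set.add_of_mem h
    simp only [PySem.Dict.insert, PySem.Dict.contains, hc, if_pos, hadd]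
    congr 1
    rw [List.map_map]
    apply List.map_congr_left
    intro x hx
    by_cases hxt : x = t <;> simp [Function.comp, hxt]
  · have hc : ((S.map (fun x => (x, f x))).any fun p => p.1 == t) = false := by
      simp only [List.any_map, Function.comp, List.any_eq_false]
      intro x hx
      simp only [beq_iff_eq]
      exact fun hxt => h (hxt ▸ hx)
    have hadd : PySem.Set.add S t = S ++ [t] := PySem.Set.add_of_not_mem h
    simp [PySem.Dict.insert, PySem.Dict.contains, hc, hadd]

theorem pv_innerA (l : List (String × List (String × List String)))
    (d : PySem.Dict String (List String)) (t : String) (v : List String) :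
    l.foldl (fun acc p => if pvHit p.2 t then PySem.Dict.modify acc t [] (fun st => PySem.Set.add st p.1) else acc) (d.insert t v)
      = d.insert t (l.foldl (fun st p => if pvHit p.2 t then PySem.Set.add st p.1 else st) v) := by
  induction l generalizing v with
  | nil => simp
  | cons p l ih =>
    simp only [List.foldl_cons]
    by_cases hh : pvHit p.2 t = true
    · rw [if_pos hh, if_pos hh]
      have hm : PySem.Dict.modify (d.insert t v) t [] (fun st => PySem.Set.add st p.1)
          = d.insert t (PySem.Set.add v p.1) := by
        simp only [PySem.Dict.modify, PySem.Dict.getD_insert_self]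
        exact pv_insert_insert_same d t v _
      rw [hm, ih]
    · rw [if_neg hh, if_neg hh, ih]

theorem pv_outer_insert (us : List String) (S : List String) (f : String → List String) :
    us.foldl (fun acc t => acc.insert t (f t)) (PySem.Dict.mk (S.map (fun x => (x, f x))))
      = PySem.Dict.mk ((us.foldl PySem.Set.add S).map (fun x => (x, f x))) := by
  induction us generalizing S with
  | nil => simp
  | cons t us ih =>
    simp only [List.foldl_cons]
    rw [pv_insert_mapfun, ih]

theorem pv_modify_mapfun (K : List String) (f : String → List String) (u : String)
    (h : List String → List String) (hu : u ∈ K) :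
    (PySem.Dict.mk (K.map (fun x => (x, f x)))).modify u [] h
      = PySem.Dict.mk (K.map (fun x => (x, if x = u then h (f u) else f x))) := by
  have hfind : K.find? (fun x => x == u) = some u := by
    cases hf : K.find? (fun x => x == u) with
    | none =>
      exfalso
      have := List.find?_eq_none.mp hf u hu
      simp at this
    | some x =>
      have hx := List.find?_some hf
      simp only [beq_iff_eq] at hx
      simp [hx]
  have hget : PySem.Dict.getD (PySem.Dict.mk (K.map (fun x => (x, f x)))) u [] = f u := by
    simp only [PySem.Dict.getD, PySem.Dict.get?, List.find?_map]
    have : ((fun p => p.1 == u) ∘ fun x => (x, f x)) = fun x => x == u := by funext x; simp [Function.comp]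
    rw [this, hfind]
    rfl
  simp only [PySem.Dict.modify, hget]
  have hc : ((K.map (fun x => (x, f x))).any fun p => p.1 == u) = true := by
    simp only [List.any_map, List.any_eq_true, Function.comp]
    exact ⟨u, hu, by simp⟩
  simp only [PySem.Dict.insert, PySem.Dict.contains, hc, if_pos]
  congr 1
  rw [List.map_map]
  apply List.map_congr_left
  intro x hx
  by_cases hxu : x = u <;> simp [Function.comp, hxu]

theorem pv_add_add_same (w : List String) (s : String) :
    PySem.Set.add (PySem.Set.add w s) s = PySem.Set.add w s := by
  simp only [PySem.Set.add_eq_ite]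
  by_cases h : s ∈ w <;> simp [h]

theorem pv_innerB (ts : List String) (K : List String) (s : String) (f : String → List String) :
    ts.foldl (fun acc t => if t ∈ K then PySem.Dict.modify acc t [] (fun st => PySem.Set.add st s) else acc)
        (PySem.Dict.mk (K.map (fun x => (x, f x))))
      = PySem.Dict.mk (K.map (fun x => (x, if x ∈ ts then PySem.Set.add (f x) s else f x))) := by
  induction ts generalizing f with
  | nil => simp
  | cons u ts ih =>
    simp only [List.foldl_cons]
    by_cases hu : u ∈ K
    · rw [if_pos hu, pv_modify_mapfun K f u _ hu, ih]
      congr 1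
      apply List.map_congr_left
      intro x hx
      by_cases hxu : x = u
      · subst hxu
        by_cases hts : x ∈ ts <;> simp [hts, pv_add_add_same]
      · simp [hxu, List.mem_cons]
    · rw [if_neg hu, ih]
      congr 1
      apply List.map_congr_left
      intro x hx
      have hxu : x ≠ u := fun h => hu (h ▸ hx)
      simp [hxu, List.mem_cons]

theorem pv_mem_ts (d : List (String × List String)) (t : String) :
    (t ∈ PySem.Dict.getD (PySem.Dict.mk d) "ZPL" [] ++ PySem.Dict.getD (PySem.Dict.mk d) "PNG" []) ↔ pvHit d t = true := by
  unfold pvHit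
  cases h1 : PySem.Dict.get? (PySem.Dict.mk d) "ZPL" <;>
    cases h2 : PySem.Dict.get? (PySem.Dict.mk d) "PNG" <;>
      simp [PySem.Dict.getD, h1, h2]

theorem pv_outerB (K : List String) (l2 l1 : List (String × List (String × List String))) :
    l2.foldl
      (fun acc p =>
        (PySem.Dict.getD (PySem.Dict.mk p.2) "ZPL" [] ++ PySem.Dict.getD (PySem.Dict.mk p.2) "PNG" []).foldl
          (fun acc t => if t ∈ K then PySem.Dict.modify acc t [] (fun st => PySem.Set.add st p.1) else acc)
          acc)
      (PySem.Dict.mk (K.map (fun x => (x, pvVal l1 x))))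
      = PySem.Dict.mk (K.map (fun x => (x, pvVal (l1 ++ l2) x))) := by
  induction l2 generalizing l1 with
  | nil => simp
  | cons p l2 ih =>
    simp only [List.foldl_cons]
    rw [pv_innerB]
    have hmap : (K.map fun x => (x, if x ∈ PySem.Dict.getD (PySem.Dict.mk p.2) "ZPL" [] ++ PySem.Dict.getD (PySem.Dict.mk p.2) "PNG" [] then PySem.Set.add (pvVal l1 x) p.1 else pvVal l1 x))
        = K.map (fun x => (x, pvVal (l1 ++ [p]) x)) := by
      apply List.map_congr_left
      intro x hx
      have hv : pvVal (l1 ++ [p]) x = if pvHit p.2 x then PySem.Set.add (pvVal l1 x) p.1 else pvVal l1 x := by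
        unfold pvVal
        rw [List.foldl_append]
        simp
      rw [hv]
      by_cases hm : pvHit p.2 x = true
      · simp [hm, (pv_mem_ts p.2 x).mpr hm]
      · have hnm : ¬ (x ∈ PySem.Dict.getD (PySem.Dict.mk p.2) "ZPL" [] ++ PySem.Dict.getD (PySem.Dict.mk p.2) "PNG" []) :=
          fun hmem => hm ((pv_mem_ts p.2 x).mp hmem)
        simp [hm, hnm]
    rw [hmap, ih (l1 ++ [p])]
    simp

-- ===== VERDICT (by name: the statement is the Claim_ definition above) =====
theorem getMappedShipmethodToTemplates_spec : Claim_equal_getMappedShipmethodToTemplates := by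
  intro smts uts _
  unfold Spec_getMappedShipmethodToTemplates
  have hA : getMappedShipmethodToTemplates smts uts
      = (PySem.Dict.mk ((uts.foldl PySem.Set.add []).map (fun x => (x, pvVal smts x)))).items := by
    unfold getMappedShipmethodToTemplates
    have hstep : (fun (acc : PySem.Dict String (List String)) (t : String) =>
        smts.foldl
          (fun acc p => if pvHit p.2 t then PySem.Dict.modify acc t [] (fun st => PySem.Set.add st p.1) else acc)
          (PySem.Dict.insert acc t ([] : List String)))
        = fun acc t => acc.insert t (pvVal smts t) := by
      funext acc t
      exact pv_innerA smts acc t []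
    rw [hstep]
    have hempty : (PySem.Dict.empty : PySem.Dict String (List String))
        = PySem.Dict.mk (([] : List String).map (fun x => (x, pvVal smts x))) := rfl
    rw [hempty, pv_outer_insert]
  have hB : getMappedShipmethodToTemplates_alt smts uts
      = (PySem.Dict.mk ((uts.foldl PySem.Set.add []).map (fun x => (x, pvVal smts x)))).items := by
    unfold getMappedShipmethodToTemplates_alt
    have hinit : uts.foldl (fun acc t => PySem.Dict.insert acc t ([] : List String)) PySem.Dict.empty
        = PySem.Dict.mk ((uts.foldl PySem.Set.add []).map (fun x => (x, pvVal [] x))) :=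
      pv_outer_insert uts [] (fun _ => ([] : List String))
    have hwanted : PySem.Set.ofList uts = uts.foldl PySem.Set.add [] := rfl
    simp only [hinit, hwanted]
    rw [pv_outerB (uts.foldl PySem.Set.add []) smts []]
    rfl
  rw [hA, hB]
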